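-- pv_equiv track=rewrite | github.com/Nagasai561/Advent-of-Code | 2023/Day-13_(1).py | vertical_reflection
-- ===== SOURCE A (Python) =====
-- def vertical_reflection(piece):
--     c = len(piece[0])
--     r = len(piece)
--
--     for line in range(0, c-1):
--         pos = True
--         for k in range(min(line+1, c-1-line)):
--             for i in range(r):
--                 if(piece[i][line-k] != piece[i][line+1+k]):
--                     pos = False
--                     break
--
--             if(not pos):
--                 break
--
--         if(pos):
--             return line+1
--
--     return -1
-- ===== SOURCE B (Python) =====
-- def vertical_reflection(piece):
--     # A mirror line is valid iff its reflected window reaches a boundary, i.e. iff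
--     # some even-length PREFIX of the column sequence is a palindrome (mirror at w//2)
--     # or some even-length SUFFIX is a palindrome (mirror at c - w//2).
--     # Collect all such candidate lines and return the smallest (leftmost), else -1.
--     c = len(piece[0])
--     cols = [tuple(row[j] for row in piece) for j in range(c)]
--     cand = []
--     for w in range(2, c + 1, 2):
--         pre = cols[:w]
--         if pre == pre[::-1]:
--             cand.append(w // 2)
--         suf = cols[c - w:]
--         if suf == suf[::-1]:
--             cand.append(c - w // 2)
--     return min(cand) if cand else -1
-- ===== Notes on version B (the rewrite author's own statement) =====
-- stated objective: alternative
-- what changed: B uses a different characterisation: a mirror line is valid iff an even-length prefix or suffix of the column sequence is a palindrome, so it builds the columns once, collects all palindromic-prefix/suffix candidate lines, and returns their minimum, instead of A's expand-around-every-line triple loop with break flags.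
-- outside the precondition, e.g. on vertical_reflection(['ab', 'a']): A returns -1, B raises IndexError
import Mathlib
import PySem

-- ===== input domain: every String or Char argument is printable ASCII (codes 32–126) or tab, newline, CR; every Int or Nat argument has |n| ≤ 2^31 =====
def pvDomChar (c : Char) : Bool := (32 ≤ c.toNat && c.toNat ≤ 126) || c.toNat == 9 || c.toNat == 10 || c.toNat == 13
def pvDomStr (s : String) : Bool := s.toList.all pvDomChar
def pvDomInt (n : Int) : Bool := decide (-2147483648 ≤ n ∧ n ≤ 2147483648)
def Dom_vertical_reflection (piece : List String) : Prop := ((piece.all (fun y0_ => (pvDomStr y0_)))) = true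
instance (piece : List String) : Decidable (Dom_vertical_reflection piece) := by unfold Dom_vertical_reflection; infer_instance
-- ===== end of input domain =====

-- B replaces A's expand-around-every-line scan by a different algorithm: a mirror line is
-- valid iff an even-length prefix or suffix of the column sequence is a palindrome, so B
-- collects those candidate lines and returns the minimum; objective: alternative structure.

-- ===== PORT A =====
-- piece[i][j] on the admitted (rectangular-enough) inputs; default never used inside Pre_
def pvChatA (piece : List String) (i j : Int) : Char :=
  (PySem.Str.pyGet? ((PySem.List.pyGet? piece i).getD "") j).getD ' '

def pvGoA (p : Int → Bool) : List Int → Int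
  | [] => -1
  | line :: rest => if p line then line + 1 else pvGoA p rest

def vertical_reflection (piece : List String) : Int :=
  let c : Int := PySem.Str.len ((PySem.List.pyGet? piece 0).getD "")
  let r : Int := (piece.length : Int)
  pvGoA
    (fun line =>
      (PySem.List.pyRange 0 (min (line + 1) (c - 1 - line)) 1).all fun k =>
        (PySem.List.pyRange 0 r 1).all fun i =>
          pvChatA piece i (line - k) == pvChatA piece i (line + 1 + k))
    (PySem.List.pyRange 0 (c - 1) 1)

-- ===== PORT B =====
-- tuple(row[j] for row in piece); row[j] in range inside Pre_, default never used there
def pvColsB (piece : List String) (c : Int) : List (List Char) :=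
  (PySem.List.pyRange 0 c 1).map fun j =>
    piece.map fun row => (PySem.Str.pyGet? row j).getD ' '

-- one loop body: seg[::-1] is seg.reverse (PySem.List.slice?_none_none_neg_one)
def pvStepB (cols : List (List Char)) (c : Int) (acc : List Int) (w : Int) : List Int :=
  let pre := PySem.List.slice cols none (some w)
  let acc1 := if pre == pre.reverse then acc ++ [PySem.Int.floordiv w 2] else acc
  let suf := PySem.List.slice cols (some (c - w)) none
  if suf == suf.reverse then acc1 ++ [c - PySem.Int.floordiv w 2] else acc1

def vertical_reflection_alt (piece : List String) : Int :=
  let c : Int := PySem.Str.len ((PySem.List.pyGet? piece 0).getD "")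
  let cols := pvColsB piece c
  let cand := (PySem.List.pyRange 2 (c + 1) 2).foldl (pvStepB cols c) []
  match PySem.List.min? cand (fun v => v) with
  | some m => m
  | none => -1

-- ===== PRECONDITION & SPEC =====
-- Pre_ excludes the empty list (A raises IndexError on piece[0]) and ragged inputs where some
-- row is shorter than the first (A raises IndexError on most of them and a short row is outside
-- the rectangular-grid domain of the task; B raises there too while building the columns).
def Pre_vertical_reflection (piece : List String) : Prop :=
  piece ≠ [] ∧ ∀ s ∈ piece, (piece.headD "").toList.length ≤ s.toList.length

instance (piece : List String) : Decidable (Pre_vertical_reflection piece) := by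
  unfold Pre_vertical_reflection; infer_instance

def pvWitness_vertical_reflection : List String := ["#..#.", "#..#.", "####."]

def Spec_vertical_reflection (piece : List String) (out : Int) : Prop := out = vertical_reflection_alt piece
instance (piece : List String) (out : Int) : Decidable (Spec_vertical_reflection piece out) := by unfold Spec_vertical_reflection; infer_instance

-- ===== CLAIM (what is proved, stated in full; the proofs are below) =====
def Claim_equal_vertical_reflection : Prop := ∀ (piece : List String), Dom_vertical_reflection piece → Pre_vertical_reflection piece → Spec_vertical_reflection piece (vertical_reflection piece)

-- ===== LEMMAS AND PROOFS =====

-- mirrored-pair condition at split v (return value v = line+1), over the column list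
def pvE (cols : List (List Char)) (v k : Nat) : Prop := cols[v-1-k]? = cols[v+k]?

def pvMirror (cols : List (List Char)) (v : Nat) : Prop :=
  ∀ k, k < min v (cols.length - v) → pvE cols v k

theorem pvGoA_eq_filter (p : Int → Bool) (xs : List Int) :
    pvGoA p xs = (match xs.filter p with | [] => -1 | l :: _ => l + 1) := by
  induction xs with
  | nil => rfl
  | cons a xs ih =>
    simp only [pvGoA, List.filter]
    cases h : p a
    · simpa [h] using ih
    · simp

theorem pvFilter_head_min (p : Int → Bool) (xs : List Int) (hps : xs.Pairwise (· < ·))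
    (l0 : Int) (rest : List Int) (h : xs.filter p = l0 :: rest) :
    ∀ l ∈ xs, p l = true → l0 ≤ l := by
  induction xs generalizing rest with
  | nil => simp at h
  | cons a t ih =>
    have hps' := List.pairwise_cons.mp hps
    intro l hl hpl
    by_cases hpa : p a = true
    · have ha : a = l0 := by
        simp only [List.filter_cons, if_pos hpa] at h
        exact (List.cons.injEq _ _ _ _ ▸ h).1
      rcases List.mem_cons.mp hl with rfl | hl'
      · omega
      · have := hps'.1 l hl'
        omega
    · rcases List.mem_cons.mp hl with rfl | hl'
      · simp [hpa] at hpl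
      · simp only [List.filter_cons, if_neg hpa] at h
        exact ih hps'.2 _ h l hl' hpl

-- an even-length list is a palindrome iff its mirrored halves agree pointwise
theorem pvPal_iff (seg : List (List Char)) (v : Nat) (hlen : seg.length = 2 * v) :
    (seg = seg.reverse) ↔ ∀ k, k < v → seg[v-1-k]? = seg[v+k]? := by
  constructor
  · intro h k hk
    have := congrArg (fun l => l[v+k]?) h
    simp only at this
    rw [List.getElem?_reverse (by omega)] at this
    rw [hlen] at this
    have e : 2 * v - 1 - (v + k) = v - 1 - k := by omega
    rw [e] at this
    exact this.symm
  · intro h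
    apply List.ext_getElem?
    intro i
    by_cases hi : i < 2 * v
    · rw [List.getElem?_reverse (by omega), hlen]
      by_cases hiv : i < v
      · have hk : v - 1 - i < v := by omega
        have := h (v - 1 - i) hk
        have e1 : v - 1 - (v - 1 - i) = i := by omega
        have e2 : v + (v - 1 - i) = 2 * v - 1 - i := by omega
        rw [e1, e2] at this
        exact this
      · have hk : i - v < v := by omega
        have := h (i - v) hk
        have e1 : v - 1 - (i - v) = 2 * v - 1 - i := by omega
        have e2 : v + (i - v) = i := by omega
        rw [e1, e2] at this
        exact this.symm
    · rw [List.getElem?_eq_none (by omega), List.getElem?_eq_none (by simp [hlen]; omega)]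

-- prefix palindrome of length 2u ↔ mirrored pairs around split u
theorem pvPrefix_iff (cols : List (List Char)) (u : Nat) (hu : 2 * u ≤ cols.length) :
    (cols.take (2 * u) = (cols.take (2 * u)).reverse) ↔ ∀ k, k < u → pvE cols u k := by
  rw [pvPal_iff _ u (by simp [List.length_take]; omega)]
  unfold pvE
  constructor
  · intro h k hk
    have := h k hk
    rwa [List.getElem?_take, if_pos (by omega), List.getElem?_take, if_pos (by omega)] at this
  · intro h k hk
    have := h k hk
    rwa [List.getElem?_take, if_pos (by omega), List.getElem?_take, if_pos (by omega)]

-- suffix palindrome of length 2u ↔ mirrored pairs around split (length - u)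
theorem pvSuffix_iff (cols : List (List Char)) (u : Nat) (hu : 2 * u ≤ cols.length) :
    (cols.drop (cols.length - 2 * u) = (cols.drop (cols.length - 2 * u)).reverse) ↔
      ∀ k, k < u → pvE cols (cols.length - u) k := by
  set n := cols.length with hn
  rw [pvPal_iff _ u (by simp [List.length_drop]; omega)]
  unfold pvE
  constructor
  · intro h k hk
    have := h k hk
    rw [List.getElem?_drop, List.getElem?_drop] at this
    have e1 : n - 2 * u + (u - 1 - k) = n - u - 1 - k := by omega
    have e2 : n - 2 * u + (u + k) = n - u + k := by omega
    rw [e1, e2] at this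
    exact this
  · intro h k hk
    have := h k hk
    rw [List.getElem?_drop, List.getElem?_drop]
    have e1 : n - 2 * u + (u - 1 - k) = n - u - 1 - k := by omega
    have e2 : n - 2 * u + (u + k) = n - u + k := by omega
    rw [e1, e2]
    exact this

-- B's fold collects exactly the per-width candidate segments
theorem pvFoldB_eq_flatMap (cols : List (List Char)) (c : Int) (ws : List Int) (acc : List Int) :
    ws.foldl (pvStepB cols c) acc = acc ++ ws.flatMap (fun w =>
      (if (PySem.List.slice cols none (some w) =
            (PySem.List.slice cols none (some w)).reverse) then [PySem.Int.floordiv w 2] else []) ++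
      (if (PySem.List.slice cols (some (c - w)) none =
            (PySem.List.slice cols (some (c - w)) none).reverse) then [c - PySem.Int.floordiv w 2] else [])) := by
  induction ws generalizing acc with
  | nil => simp
  | cons w ws ih =>
    rw [List.foldl_cons, ih, List.flatMap_cons]
    have : pvStepB cols c acc w = acc ++
        ((if (PySem.List.slice cols none (some w) =
              (PySem.List.slice cols none (some w)).reverse) then [PySem.Int.floordiv w 2] else []) ++
         (if (PySem.List.slice cols (some (c - w)) none =
              (PySem.List.slice cols (some (c - w)) none).reverse) then [c - PySem.Int.floordiv w 2] else [])) := by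
      unfold pvStepB
      simp only [beq_iff_eq]
      split_ifs <;> simp
    rw [this, List.append_assoc]

theorem pvChatA_cast (piece : List String) (iN jN : Nat) :
    pvChatA piece (iN : Int) (jN : Int) = ((piece[iN]?.getD "").toList[jN]?).getD ' ' := by
  simp [pvChatA]

-- ===== VERDICT (by name: the statement is the Claim_ definition above) =====
theorem vertical_reflection_spec : Claim_equal_vertical_reflection := by
  intro piece _ hpre
  obtain ⟨hne, hlen⟩ := hpre
  unfold Spec_vertical_reflection vertical_reflection vertical_reflection_alt
  simp only []
  set s0 : String := (PySem.List.pyGet? piece 0).getD "" with hs0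
  set cN : Nat := s0.toList.length with hcN
  have hc : PySem.Str.len s0 = (cN : Int) := PySem.Str.len_eq s0
  set f : Int → List Char := fun j => piece.map fun row => (PySem.Str.pyGet? row j).getD ' ' with hf
  set cols : List (List Char) := pvColsB piece (PySem.Str.len s0) with hcolsdef
  have hmap : cols = (PySem.List.pyRange 0 (PySem.Str.len s0) 1).map f := rfl
  have hclen : cols.length = cN := by
    rw [hmap, List.length_map, hc, PySem.List.length_pyRange_one]
    omega
  have hget : ∀ j < cN, cols[j]? = some (f (j : Int)) := by
    intro j hj
    rw [hmap, hc]
    exact PySem.List.getElem?_map_pyRange_zero f cN j hj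
  -- the A-side per-line predicate characterised by pvMirror
  set r : Int := (piece.length : Int) with hr
  set p : Int → Bool := fun line =>
      (PySem.List.pyRange 0 (min (line + 1) (PySem.Str.len s0 - 1 - line)) 1).all fun k =>
        (PySem.List.pyRange 0 r 1).all fun i =>
          pvChatA piece i (line - k) == pvChatA piece i (line + 1 + k) with hp
  have hchar : ∀ line : Int, 0 ≤ line → line < (cN : Int) - 1 →
      (p line = true ↔ pvMirror cols (line + 1).toNat) := by
    intro line h0 h1
    set l : Nat := line.toNat with hlN
    have hlv : line = (l : Int) := by omega
    have hlc : l + 1 < cN := by omega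
    rw [hp]
    simp only [List.all_eq_true]
    unfold pvMirror pvE
    rw [hclen]
    have hv : (line + 1).toNat = l + 1 := by omega
    rw [hv]
    constructor
    · intro hA k hk
      have hk' : k < min (l + 1) (cN - (l + 1)) := hk
      have h1' : l + 1 - 1 - k < cN := by omega
      have h2' : l + 1 + k < cN := by omega
      rw [hget _ h1', hget _ h2']
      congr 1
      rw [hf]
      rw [List.map_eq_map_iff]
      rw [List.forall_mem_iff_forall_getElem]
      intro i hi
      have hA' := hA (k : Int) (by rw [hc, PySem.List.mem_pyRange_one]; constructor <;> omega)
      have hA'' := hA' (i : Int) (by rw [PySem.List.mem_pyRange_one]; constructor <;> omega)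
      rw [beq_iff_eq] at hA''
      have e1 : line - (k : Int) = ((l + 1 - 1 - k : Nat) : Int) := by omega
      have e2 : line + 1 + (k : Int) = ((l + 1 + k : Nat) : Int) := by omega
      rw [e1, e2, pvChatA_cast, pvChatA_cast] at hA''
      rw [List.getElem?_eq_getElem hi, Option.getD_some] at hA''
      simp only [PySem.Str.pyGet?_natCast]
      exact hA''
    · intro hB k hkmem
      rw [hc, PySem.List.mem_pyRange_one] at hkmem
      obtain ⟨hk0, hk1⟩ := hkmem
      intro i himem
      rw [PySem.List.mem_pyRange_one] at himem
      obtain ⟨hi0, hi1⟩ := himem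
      rw [beq_iff_eq]
      set kN : Nat := k.toNat with hkN
      set iN : Nat := i.toNat with hiN
      have hkv : k = (kN : Int) := by omega
      have hiv : i = (iN : Int) := by omega
      have hkm : kN < min (l + 1) (cN - (l + 1)) := by omega
      have h1' : l + 1 - 1 - kN < cN := by omega
      have h2' : l + 1 + kN < cN := by omega
      have hB' := hB kN hkm
      rw [hget _ h1', hget _ h2', Option.some_inj, hf, List.map_eq_map_iff,
          List.forall_mem_iff_forall_getElem] at hB'
      have hiln : iN < piece.length := by omega
      have := hB' iN hiln
      have e1 : line - k = ((l + 1 - 1 - kN : Nat) : Int) := by omega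
      have e2 : line + 1 + k = ((l + 1 + kN : Nat) : Int) := by omega
      rw [hkv, hiv] at *
      rw [e1, e2, pvChatA_cast, pvChatA_cast]
      rw [List.getElem?_eq_getElem hiln, Option.getD_some]
      simp only [PySem.Str.pyGet?_natCast] at this
      exact this
  -- the B-side candidate list characterised by pvMirror
  set cand : List Int := (PySem.List.pyRange 2 (PySem.Str.len s0 + 1) 2).foldl (pvStepB cols (PySem.Str.len s0)) [] with hcand
  have hmemcand : ∀ v : Int, v ∈ cand ↔ (1 ≤ v ∧ v ≤ (cN : Int) - 1 ∧ pvMirror cols v.toNat) := by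
    intro v
    rw [hcand, pvFoldB_eq_flatMap, List.nil_append, List.mem_flatMap]
    constructor
    · rintro ⟨w, hw, hv⟩
      rw [hc, PySem.List.mem_pyRange_iff_of_pos (by norm_num)] at hw
      obtain ⟨hw2, hwc, hwd⟩ := hw
      obtain ⟨u, hu⟩ : ∃ u : Nat, w = 2 * (u : Int) ∧ 1 ≤ u ∧ 2 * u ≤ cN := by
        obtain ⟨t, ht⟩ := hwd
        refine ⟨(t + 1).toNat, by omega, by omega, by omega⟩
      obtain ⟨hweq, hu1, hu2⟩ := hu
      have hfd : PySem.Int.floordiv w 2 = (u : Int) := by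
        rw [hweq]
        have : (2 : Int) * (u : Int) = (u : Int) * 2 := by ring
        rw [this, PySem.Int.floordiv]
        simp [Int.mul_fdiv_cancel]
      rw [List.mem_append] at hv
      rcases hv with hv | hv
      · -- prefix palindrome branch
        split_ifs at hv with hpal
        · rw [List.mem_singleton] at hv
          subst hv
          rw [hfd]
          have hsl : PySem.List.slice cols none (some w) = cols.take (2 * u) := by
            rw [PySem.List.slice_to cols (by omega)]
            congr 1; omega
          rw [hsl] at hpal
          have hmir := (pvPrefix_iff cols u (by omega)).mp hpal
          refine ⟨by omega, by omega, ?_⟩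
          have : ((u : Int)).toNat = u := by omega
          rw [this]
          intro k hk
          exact hmir k (by omega)
        · simp at hv
      · split_ifs at hv with hpal
        · rw [List.mem_singleton] at hv
          subst hv
          rw [hc, hfd]
          have hsl : PySem.List.slice cols (some ((cN : Int) - w)) none = cols.drop (cols.length - 2 * u) := by
            rw [PySem.List.slice_from cols (by omega)]
            congr 1; omega
          rw [hc, hsl] at hpal
          have hmir := (pvSuffix_iff cols u (by omega)).mp hpal
          refine ⟨by omega, by omega, ?_⟩
          have : ((cN : Int) - (u : Int)).toNat = cols.length - u := by omega
          rw [this]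
          intro k hk
          exact hmir k (by omega)
        · simp at hv
    · rintro ⟨hv1, hv2, hmir⟩
      set vN : Nat := v.toNat with hvN
      have hvv : v = (vN : Int) := by omega
      by_cases hside : vN ≤ cN - vN
      · -- mirror touches the left boundary: even palindromic prefix of width 2*vN
        refine ⟨2 * (vN : Int), ?_, ?_⟩
        · rw [hc, PySem.List.mem_pyRange_iff_of_pos (by norm_num)]
          refine ⟨by omega, by omega, ⟨(vN : Int) - 1, by ring⟩⟩
        · rw [List.mem_append]
          left
          have hsl : PySem.List.slice cols none (some (2 * (vN : Int))) = cols.take (2 * vN) := by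
            rw [PySem.List.slice_to cols (by omega),
              show (2 * (vN : Int)).toNat = 2 * vN from by omega]
          rw [hsl]
          have hpal : cols.take (2 * vN) = (cols.take (2 * vN)).reverse := by
            rw [pvPrefix_iff cols vN (by omega)]
            intro k hk
            apply hmir
            rw [hclen]
            omega
          rw [if_pos hpal, List.mem_singleton]
          have hfd : PySem.Int.floordiv (2 * (vN : Int)) 2 = (vN : Int) := by
            have : (2 : Int) * (vN : Int) = (vN : Int) * 2 := by ring
            rw [this, PySem.Int.floordiv]
            simp [Int.mul_fdiv_cancel]
          rw [hfd]; omega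
      · -- mirror touches the right boundary: even palindromic suffix of width 2*(cN-vN)
        set u : Nat := cN - vN with hu
        refine ⟨2 * (u : Int), ?_, ?_⟩
        · rw [hc, PySem.List.mem_pyRange_iff_of_pos (by norm_num)]
          refine ⟨by omega, by omega, ⟨(u : Int) - 1, by ring⟩⟩
        · rw [List.mem_append]
          right
          have hsl : PySem.List.slice cols (some (PySem.Str.len s0 - 2 * (u : Int))) none = cols.drop (cols.length - 2 * u) := by
            rw [hc, PySem.List.slice_from cols (by omega)]
            congr 1; omega
          rw [hsl]
          have hpal : cols.drop (cols.length - 2 * u) = (cols.drop (cols.length - 2 * u)).reverse := by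
            rw [pvSuffix_iff cols u (by omega)]
            intro k hk
            have e : cols.length - u = vN := by rw [hclen]; omega
            rw [e]
            apply hmir
            rw [hclen]
            omega
          rw [if_pos hpal, List.mem_singleton]
          have hfd : PySem.Int.floordiv (2 * (u : Int)) 2 = (u : Int) := by
            have : (2 : Int) * (u : Int) = (u : Int) * 2 := by ring
            rw [this, PySem.Int.floordiv]
            simp [Int.mul_fdiv_cancel]
          rw [hfd, hc]; omega
  -- assemble: A's first match equals B's minimum candidate
  rw [pvGoA_eq_filter]
  set xs : List Int := PySem.List.pyRange 0 (PySem.Str.len s0 - 1) 1 with hxs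
  cases hflt : xs.filter p with
  | nil =>
    have hnone : cand = [] := by
      rw [List.eq_nil_iff_forall_not_mem]
      intro v hv
      obtain ⟨hv1, hv2, hmir⟩ := (hmemcand v).mp hv
      have hmem : (v - 1) ∈ xs := by
        rw [hxs, hc, PySem.List.mem_pyRange_one]; omega
      have hpv : p (v - 1) = true := by
        rw [hchar (v - 1) (by omega) (by omega)]
        have : (v - 1 + 1).toNat = v.toNat := by omega
        rw [this]
        exact hmir
      have : (v - 1) ∈ xs.filter p := List.mem_filter.mpr ⟨hmem, hpv⟩
      rw [hflt] at this
      simp at this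
    rw [hnone]
    rfl
  | cons l0 rest =>
    have hl0mem : l0 ∈ xs ∧ p l0 = true := by
      have : l0 ∈ xs.filter p := by rw [hflt]; simp
      exact ⟨(List.mem_filter.mp this).1, (List.mem_filter.mp this).2⟩
    obtain ⟨hl0x, hl0p⟩ := hl0mem
    have hl0b : 0 ≤ l0 ∧ l0 < (cN : Int) - 1 := by
      rw [hxs, hc, PySem.List.mem_pyRange_one] at hl0x; omega
    have hv0cand : (l0 + 1) ∈ cand := by
      rw [hmemcand]
      refine ⟨by omega, by omega, ?_⟩
      exact (hchar l0 hl0b.1 hl0b.2).mp hl0p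
    have hmin : ∀ l ∈ xs, p l = true → l0 ≤ l := by
      apply pvFilter_head_min p xs _ l0 rest hflt
      rw [hxs]
      exact PySem.List.pairwise_lt_pyRange_one 0 (PySem.Str.len s0 - 1)
    cases hm : PySem.List.min? cand (fun v => v) with
    | none =>
      rw [PySem.List.min?_eq_none_iff] at hm
      rw [hm] at hv0cand
      simp at hv0cand
    | some m =>
      have hmmem := PySem.List.min?_mem hm
      have hmle : m ≤ l0 + 1 := PySem.List.min?_isMin hm (l0 + 1) hv0cand
      obtain ⟨hm1, hm2, hmmir⟩ := (hmemcand m).mp hmmem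
      have hmemx : (m - 1) ∈ xs := by
        rw [hxs, hc, PySem.List.mem_pyRange_one]; omega
      have hpm : p (m - 1) = true := by
        rw [hchar (m - 1) (by omega) (by omega)]
        have : (m - 1 + 1).toNat = m.toNat := by omega
        rw [this]
        exact hmmir
      have := hmin (m - 1) hmemx hpm
      show l0 + 1 = m
      omega
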